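-- pv_equiv track=rewrite | github.com/billyean/acadia | python/parray/intersection.py | intersectNum
-- ===== SOURCE A (Python) =====
-- def intersectNum(arrs):
--     map = {}
--     n = 0
--     for l in arrs:
--         for i in l:
--             if i in map:
--                 map[i].append(n)
--             else:
--                 map[i] = [n]
--         n += 1
--
--     intersect = 0
--     for (k, v) in map.items():
--         if len(v) == n:
--             intersect += 1
--
--     return intersect
-- ===== SOURCE B (Python) =====
-- def intersectNum(arrs):
--     n = len(arrs)
--     flat = sorted(x for l in arrs for x in l)
--     res = 0
--     i = 0
--     m = len(flat)
--     while i < m: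
--         j = i + 1
--         while j < m and flat[j] == flat[i]:
--             j += 1
--         if j - i == n:
--             res += 1
--         i = j
--     return res
-- ===== Notes on version B (the rewrite author's own statement) =====
-- stated objective: alternative
-- what changed: Replaces the dict-of-index-lists grouping with flatten-sort and a single run-length scan over the sorted data, counting runs whose length equals len(arrs).
import Mathlib
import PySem

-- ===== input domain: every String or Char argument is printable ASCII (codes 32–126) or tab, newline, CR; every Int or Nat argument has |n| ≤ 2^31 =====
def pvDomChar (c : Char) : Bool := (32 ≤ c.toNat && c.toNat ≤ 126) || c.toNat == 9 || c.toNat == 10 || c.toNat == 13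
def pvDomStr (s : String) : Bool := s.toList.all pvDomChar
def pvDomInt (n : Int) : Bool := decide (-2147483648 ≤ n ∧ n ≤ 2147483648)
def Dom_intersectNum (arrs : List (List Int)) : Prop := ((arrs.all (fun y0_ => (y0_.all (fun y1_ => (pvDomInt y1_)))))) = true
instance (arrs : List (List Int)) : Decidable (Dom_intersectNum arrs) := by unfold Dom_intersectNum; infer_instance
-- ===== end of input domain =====

-- B replaces A's dict-of-index-lists grouping by a flatten-sort and a single run-length scan
-- (alternative algorithm of similar cost; no speed claim).

-- ===== PORT A =====
def intersectNum (arrs : List (List Int)) : Int :=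
  let st := arrs.foldl
    (fun (st : PySem.Dict Int (List Int) × Int) l =>
      (l.foldl (fun m i =>
          if m.contains i then m.modify i [] (fun v => v ++ [st.2])
          else m.insert i [st.2]) st.1,
       st.2 + 1))
    (PySem.Dict.empty, 0)
  st.1.items.foldl (fun acc kv => if (kv.2.length : Int) == st.2 then acc + 1 else acc) 0

-- ===== PORT B =====
-- Source B's outer while loop: the inner while advances j past the run of elements equal to
-- flat[i] (takeWhile counts it), then i jumps to j (dropWhile); res += 1 when the run
-- length j - i equals n.
def pvRunScan (xs : List Int) (n : Int) : Int :=
  match xs with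
  | [] => 0
  | x :: rest =>
    (if ((rest.takeWhile (fun y => y == x)).length + 1 : Int) == n then 1 else 0)
      + pvRunScan (rest.dropWhile (fun y => y == x)) n
termination_by xs.length
decreasing_by simpa using Nat.lt_succ_of_le (List.length_dropWhile_le _ _)

def intersectNum_alt (arrs : List (List Int)) : Int :=
  let n : Int := arrs.length
  let flat := PySem.List.sorted (arrs.flatMap id) (fun x => x) false
  pvRunScan flat n

-- ===== PRECONDITION & SPEC =====
def Spec_intersectNum (arrs : List (List Int)) (out : Int) : Prop := out = intersectNum_alt arrs
instance (arrs : List (List Int)) (out : Int) : Decidable (Spec_intersectNum arrs out) := by unfold Spec_intersectNum; infer_instance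

-- ===== CLAIM (what is proved, stated in full; the proofs are below) =====
def Claim_equal_intersectNum : Prop := ∀ (arrs : List (List Int)), Dom_intersectNum arrs → Spec_intersectNum arrs (intersectNum arrs)

-- ===== LEMMAS AND PROOFS =====

-- the common value both programs compute: how many distinct elements of `flat`
-- occur exactly `n` times in `flat`
def pvCnt (flat : List Int) (n : Int) : Int :=
  ((PySem.Set.ofList flat).countP (fun k => ((flat.count k : Int) == n)) : Int)

-- A's if/else branch is exactly Dict.modify
theorem pv_dict_step (m : PySem.Dict Int (List Int)) (i c : Int) :
    (if m.contains i then m.modify i [] (fun v => v ++ [c]) else m.insert i [c])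
      = m.modify i [] (fun v => v ++ [c]) := by
  by_cases h : m.contains i
  · simp [h]
  · simp [h, PySem.Dict.modify, PySem.Dict.getD_of_not_contains m [] (by simpa using h)]

-- inner loop of A: value-list length at k grows by l.count k
theorem pv_inner_len (l : List Int) (d : PySem.Dict Int (List Int)) (c k : Int) :
    ((l.foldl (fun m i =>
        if m.contains i then m.modify i [] (fun v => v ++ [c])
        else m.insert i [c]) d).getD k []).length
      = (d.getD k []).length + l.count k := by
  have hfun : (fun (m : PySem.Dict Int (List Int)) (i : Int) =>
      if m.contains i then m.modify i [] (fun v => v ++ [c]) else m.insert i [c])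
      = fun m i => m.modify i [] (fun v => v ++ [c]) := by
    funext m i; exact pv_dict_step m i c
  rw [hfun]
  have h := PySem.Dict.getD_foldl_modify_append (l.map (fun x => (x, c))) d k
  rw [List.foldl_map] at h
  simp only [] at h
  rw [h]
  simp [List.filter_map, List.count_eq_countP, Function.comp_def, List.countP_eq_length_filter]

-- inner loop of A: keys
theorem pv_inner_keys (l : List Int) (d : PySem.Dict Int (List Int)) (c : Int) :
    (l.foldl (fun m i =>
        if m.contains i then m.modify i [] (fun v => v ++ [c])
        else m.insert i [c]) d).keys = PySem.Set.update d.keys l := by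
  have hfun : (fun (m : PySem.Dict Int (List Int)) (i : Int) =>
      if m.contains i then m.modify i [] (fun v => v ++ [c]) else m.insert i [c])
      = fun m i => m.modify i [] (fun v => v ++ [c]) := by
    funext m i; exact pv_dict_step m i c
  rw [hfun]
  exact PySem.Dict.keys_foldl_modify l [] (fun _ _ v => v ++ [c]) d

theorem pv_inner_nodup (l : List Int) (d : PySem.Dict Int (List Int)) (c : Int)
    (h : d.keys.Nodup) :
    (l.foldl (fun m i =>
        if m.contains i then m.modify i [] (fun v => v ++ [c])
        else m.insert i [c]) d).keys.Nodup := by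
  have hfun : (fun (m : PySem.Dict Int (List Int)) (i : Int) =>
      if m.contains i then m.modify i [] (fun v => v ++ [c]) else m.insert i [c])
      = fun m i => m.modify i [] (fun v => v ++ [c]) := by
    funext m i; exact pv_dict_step m i c
  rw [hfun]
  exact PySem.Dict.nodup_keys_foldl_modify_key l (fun x => x) [] (fun _ _ v => v ++ [c]) d h

-- the outer loop of A, all invariants at once
theorem pv_outer (arrs : List (List Int)) :
    ∀ (d : PySem.Dict Int (List Int)) (c : Int),
    (arrs.foldl
      (fun (st : PySem.Dict Int (List Int) × Int) l =>
        (l.foldl (fun m i =>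
            if m.contains i then m.modify i [] (fun v => v ++ [st.2])
            else m.insert i [st.2]) st.1,
         st.2 + 1)) (d, c)).2 = c + arrs.length
    ∧ (arrs.foldl
      (fun (st : PySem.Dict Int (List Int) × Int) l =>
        (l.foldl (fun m i =>
            if m.contains i then m.modify i [] (fun v => v ++ [st.2])
            else m.insert i [st.2]) st.1,
         st.2 + 1)) (d, c)).1.keys = PySem.Set.update d.keys (arrs.flatMap id)
    ∧ (d.keys.Nodup → (arrs.foldl
      (fun (st : PySem.Dict Int (List Int) × Int) l =>
        (l.foldl (fun m i =>
            if m.contains i then m.modify i [] (fun v => v ++ [st.2])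
            else m.insert i [st.2]) st.1,
         st.2 + 1)) (d, c)).1.keys.Nodup)
    ∧ ∀ k, ((arrs.foldl
      (fun (st : PySem.Dict Int (List Int) × Int) l =>
        (l.foldl (fun m i =>
            if m.contains i then m.modify i [] (fun v => v ++ [st.2])
            else m.insert i [st.2]) st.1,
         st.2 + 1)) (d, c)).1.getD k []).length
        = (d.getD k []).length + (arrs.flatMap id).count k := by
  induction arrs with
  | nil => intro d c; simp [PySem.Set.update]
  | cons l rest ih =>
    intro d c
    simp only [List.foldl_cons]
    obtain ⟨ih1, ih2, ih3, ih4⟩ := ih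
      (l.foldl (fun m i =>
        if m.contains i then m.modify i [] (fun v => v ++ [c])
        else m.insert i [c]) d) (c + 1)
    refine ⟨by rw [ih1]; simp; ring, ?_, ?_, ?_⟩
    · rw [ih2, pv_inner_keys]
      simp [PySem.Set.update, List.foldl_append]
    · intro hnd
      exact ih3 (pv_inner_nodup l d c hnd)
    · intro k
      rw [ih4 k, pv_inner_len]
      simp [List.count_append]
      omega

-- A computes pvCnt of the flattened input
theorem pv_A_eq (arrs : List (List Int)) :
    intersectNum arrs = pvCnt (arrs.flatMap id) arrs.length := by
  unfold intersectNum
  obtain ⟨h2, hkeys, hnodup, hlen⟩ :=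
    pv_outer arrs (PySem.Dict.empty : PySem.Dict Int (List Int)) 0
  simp only []
  rw [PySem.List.foldl_count_if]
  have hnd := hnodup PySem.Dict.nodup_keys_empty
  rw [PySem.Dict.items_eq_map_keys _ hnd ([] : List Int), List.countP_map]
  rw [h2, hkeys]
  have hkeq : PySem.Set.update (PySem.Dict.empty : PySem.Dict Int (List Int)).keys (arrs.flatMap id)
      = PySem.Set.ofList (arrs.flatMap id) := by
    rw [PySem.Set.ofList_eq_foldl, PySem.Dict.keys_empty]; rfl
  rw [hkeq]
  unfold pvCnt
  simp only [Function.comp_def, hlen, PySem.Dict.getD_empty, List.length_nil, zero_add]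

-- sets built by foldl add ignore a first element absent from the rest
theorem pv_foldl_add_cons (t : List Int) :
    ∀ (acc : List Int) (x : Int), (∀ z ∈ t, z ≠ x) →
    t.foldl PySem.Set.add (x :: acc) = x :: t.foldl PySem.Set.add acc := by
  induction t with
  | nil => intro acc x h; rfl
  | cons z t ih =>
    intro acc x h
    have hz : z ≠ x := h z (by simp)
    have hrest : ∀ w ∈ t, w ≠ x := fun w hw => h w (by simp [hw])
    simp only [List.foldl_cons, PySem.Set.add_eq_ite, List.mem_cons]
    by_cases hm : z ∈ acc
    · simp [hm, hz, ih acc x hrest]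
    · simp [hm, hz, ih (acc ++ [z]) x hrest]

-- a foldl of Set.add over a run of equal elements is a no-op
theorem pv_foldl_add_const (s : List Int) (x : Int) (h : ∀ y ∈ s, y = x) :
    s.foldl PySem.Set.add [x] = [x] := by
  induction s with
  | nil => rfl
  | cons y s ih =>
    have hy : y = x := h y (by simp)
    subst hy
    simp only [List.foldl_cons, PySem.Set.add_eq_ite, List.mem_singleton]
    exact ih (fun z hz => h z (by simp [hz]))

-- the run scan on a sorted list computes pvCnt
theorem pv_runScan_eq (N : Nat) :
    ∀ (xs : List Int), xs.length ≤ N → xs.Pairwise (· ≤ ·) → ∀ n,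
    pvRunScan xs n = pvCnt xs n := by
  induction N with
  | zero =>
    intro xs hlen _ n
    have hx : xs = [] := List.eq_nil_of_length_eq_zero (Nat.le_zero.mp hlen)
    subst hx
    simp [pvRunScan, pvCnt, PySem.Set.ofList_eq_foldl]
  | succ N ih =>
    intro xs hlen hpw n
    cases xs with
    | nil => simp [pvRunScan, pvCnt, PySem.Set.ofList_eq_foldl]
    | cons x rest =>
      rw [pvRunScan]
      have hst : rest.takeWhile (fun y => y == x) ++ rest.dropWhile (fun y => y == x) = rest :=
        List.takeWhile_append_dropWhile
      set s := rest.takeWhile (fun y => y == x) with hs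
      set t := rest.dropWhile (fun y => y == x) with ht
      have hsx : ∀ y ∈ s, y = x := fun y hy => by
        have := List.mem_takeWhile_imp hy; simpa using this
      have hxle : ∀ y ∈ rest, x ≤ y := (List.pairwise_cons.mp hpw).1
      have hpt : t.Pairwise (· ≤ ·) :=
        List.Pairwise.sublist (List.dropWhile_sublist _) (List.pairwise_cons.mp hpw).2
      have htx : ∀ z ∈ t, z ≠ x := by
        cases ht' : t with
        | nil => simp
        | cons y ys =>
          have hhead := List.head?_dropWhile_not (fun y => y == x) rest
          rw [← ht, ht'] at hhead
          simp only [List.head?_cons] at hhead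
          have hyx : y ≠ x := by simpa using hhead
          have hyr : y ∈ rest := by rw [← hst, ht']; simp
          have hxy : x < y := lt_of_le_of_ne (hxle y hyr) (Ne.symm hyx)
          intro z hz
          rcases List.mem_cons.mp hz with rfl | hz'
          · exact hyx
          · have hyz : y ≤ z := (List.pairwise_cons.mp (ht' ▸ hpt)).1 z hz'
            omega
      have hcs : s.count x = s.length :=
        List.count_eq_length.mpr (fun b hb => (hsx b hb).symm)
      have hct : t.count x = 0 :=
        List.count_eq_zero.mpr (fun hx => htx x hx rfl)
      have hcx : (x :: rest).count x = s.length + 1 := by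
        rw [← hst]
        simp [List.count_append, hcs, hct]
      have hset : PySem.Set.ofList (x :: rest) = x :: PySem.Set.ofList t := by
        rw [PySem.Set.ofList_eq_foldl, ← hst]
        have h1 : PySem.Set.add ([] : List Int) x = [x] := by simp

        rw [List.foldl_cons, h1, List.foldl_append]
        rw [pv_foldl_add_const s x hsx]
        have := pv_foldl_add_cons t [] x htx
        rw [this, PySem.Set.ofList_eq_foldl]
      have hck : ∀ k ∈ t, (x :: rest).count k = t.count k := by
        intro k hk
        have hkx : k ≠ x := htx k hk
        rw [← hst]
        simp [List.count_cons, List.count_append,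
          List.count_eq_zero.mpr (fun hks => hkx (hsx k hks))]
        exact fun h => hkx h.symm
      have hlt : t.length ≤ N := by
        have h1 : t.length ≤ rest.length := ht ▸ List.length_dropWhile_le _ _
        simpa using Nat.le_trans h1 (Nat.lt_succ_iff.mp (Nat.lt_of_lt_of_le (Nat.lt_succ_of_le le_rfl) hlen))
      have hih := ih t hlt hpt n
      unfold pvCnt
      rw [hset, List.countP_cons]
      have hpred : ∀ k ∈ PySem.Set.ofList t,
          (((x :: rest).count k : Int) == n) = ((t.count k : Int) == n) := by
        intro k hk
        rw [hck k (by simpa [PySem.Set.mem_ofList] using hk)]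
      rw [List.countP_congr (fun k hk => by rw [hpred k hk])]
      unfold pvCnt at hih
      rw [hih, hcx]
      simp only [Nat.cast_add, Nat.cast_one]
      split_ifs <;> push_cast <;> omega

-- B computes pvCnt of the flattened input
theorem pv_B_eq (arrs : List (List Int)) :
    intersectNum_alt arrs = pvCnt (arrs.flatMap id) arrs.length := by
  unfold intersectNum_alt
  simp only []
  have hperm := PySem.List.sorted_perm (arrs.flatMap id) (fun x => x) false
  have hpw : (PySem.List.sorted (arrs.flatMap id) (fun x => x) false).Pairwise (· ≤ ·) := by
    simpa using PySem.List.sorted_pairwise (arrs.flatMap id) (fun x => x)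
  rw [pv_runScan_eq (PySem.List.sorted (arrs.flatMap id) (fun x => x) false).length _ le_rfl hpw]
  unfold pvCnt
  have hcount := hperm.count_eq
  have h1 : ∀ k ∈ PySem.Set.ofList (PySem.List.sorted (arrs.flatMap id) (fun x => x) false),
      (((PySem.List.sorted (arrs.flatMap id) (fun x => x) false).count k : Int) == (arrs.length : Int))
        = (((arrs.flatMap id).count k : Int) == (arrs.length : Int)) := by
    intro k _; rw [hcount k]
  rw [List.countP_congr (fun k hk => by rw [h1 k hk])]
  have hps : (PySem.Set.ofList (PySem.List.sorted (arrs.flatMap id) (fun x => x) false)).Perm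
      (PySem.Set.ofList (arrs.flatMap id)) := by
    rw [List.perm_ext_iff_of_nodup (PySem.Set.nodup_ofList _) (PySem.Set.nodup_ofList _)]
    intro a
    simp [PySem.Set.mem_ofList, PySem.List.mem_sorted]
  rw [hps.countP_eq]

-- ===== VERDICT (by name: the statement is the Claim_ definition above) =====
theorem intersectNum_spec : Claim_equal_intersectNum := by
  intro arrs _
  unfold Spec_intersectNum
  rw [pv_A_eq, pv_B_eq]
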